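-- pv_equiv track=rewrite | github.com/mihaicrisan04/comp-programming | random/amazon/2.py | group1WinCount
-- ===== SOURCE A (Python) =====
-- def group1WinCount(g1, g2):
--     n = len(g1)
--     mod = 10**9 + 7
--
--     d = [g1[i] - g2[i] for i in range(n)]
--     d.sort()
--
--     ans = 0
--     for i in range(n):
--         if d[i] > 0:
--             ans += (n - i - 1)
--             if ans > 0: ans %= mod
--         else:
--             l, r = 0, len(d)
--             while l < r:
--                 mid = (l + r) // 2
--                 if d[mid] <= -d[i]:
--                     l = mid + 1
--                 else:
--                     r = mid
--             ans += (n - l)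
--             if ans > 0: ans %= mod
--
--     return ans
-- ===== SOURCE B (Python) =====
-- def group1WinCount(g1, g2):
--     mod = 10**9 + 7
--     d = sorted(a - b for a, b in zip(g1, g2))
--     count = 0
--     l, r = 0, len(d) - 1
--     while l < r:
--         if d[l] + d[r] > 0:
--             count += r - l
--             r -= 1
--         else:
--             l += 1
--     return count % mod
-- ===== Notes on version B (the rewrite author's own statement) =====
-- stated objective: faster
-- what changed: Replaces A's per-element branching plus hand-written binary search over the sorted differences by a single inward two-pointer sweep over the sorted differences, taking the modulus once at the end.
import Mathlib
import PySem

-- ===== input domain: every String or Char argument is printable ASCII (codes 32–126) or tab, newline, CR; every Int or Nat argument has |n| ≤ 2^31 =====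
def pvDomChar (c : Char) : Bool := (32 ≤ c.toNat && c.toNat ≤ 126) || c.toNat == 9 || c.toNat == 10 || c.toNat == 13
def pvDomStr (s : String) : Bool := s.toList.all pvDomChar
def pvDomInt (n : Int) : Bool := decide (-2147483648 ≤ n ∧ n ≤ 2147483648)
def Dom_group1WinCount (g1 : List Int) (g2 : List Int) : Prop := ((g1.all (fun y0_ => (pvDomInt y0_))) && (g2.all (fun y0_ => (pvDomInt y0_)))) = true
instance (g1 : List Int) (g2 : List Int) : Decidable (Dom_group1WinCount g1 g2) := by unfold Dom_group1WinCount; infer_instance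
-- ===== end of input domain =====

-- B replaces A's per-element binary search over the sorted differences by a single
-- inward two-pointer sweep, taking the modulus once at the end (objective: faster, measured).

-- ===== PORT A =====
-- A's inner while-loop (binary search). l, r are kept as Nat: in A they start at
-- 0 and len(d) and stay in [0, len(d)], so this is exact.
def pvBsearchA (d : List Int) (x : Int) (l r : Nat) : Nat :=
  if l < r then
    -- mid = (l + r) // 2 (Python floor division = Nat division here, both args ≥ 0)
    if d.getD ((l + r) / 2) 0 ≤ x then pvBsearchA d x ((l + r) / 2 + 1) r
    else pvBsearchA d x l ((l + r) / 2)
  else l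
termination_by r - l
decreasing_by all_goals omega

def group1WinCount (g1 : List Int) (g2 : List Int) : Int :=
  let n := g1.length
  let m := (1000000007 : Int)
  -- d[i] for i ∈ range(n): indices are in range under Pre_, so getD is exact
  let d := (List.range n).map (fun i => g1.getD i 0 - g2.getD i 0)
  let d := PySem.List.sorted d (fun x => x) false
  (List.range n).foldl (fun ans i =>
    if d.getD i 0 > 0 then
      let ans := ans + ((n : Int) - (i : Int) - 1)
      if ans > 0 then ans % m else ans
    else
      let l := pvBsearchA d (-(d.getD i 0)) 0 d.length
      let ans := ans + ((n : Int) - (l : Int))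
      if ans > 0 then ans % m else ans) 0

-- ===== PORT B =====
-- B's while-loop. l, r as Nat is exact: Python's l, r stay ≥ 0 except r = -1 for an
-- empty d, where the loop is not entered either way (0 < 0 is false).
def pvTwoPtr (d : List Int) (l r : Nat) (c : Int) : Int :=
  if l < r then
    if d.getD l 0 + d.getD r 0 > 0 then pvTwoPtr d l (r - 1) (c + ((r - l : Nat) : Int))
    else pvTwoPtr d (l + 1) r c
  else c
termination_by r - l
decreasing_by all_goals omega

def group1WinCount_alt (g1 : List Int) (g2 : List Int) : Int :=
  let m := (1000000007 : Int)
  let d := PySem.List.sorted ((g1.zip g2).map (fun p => p.1 - p.2)) (fun x => x) false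
  pvTwoPtr d 0 (d.length - 1) 0 % m

-- ===== PRECONDITION & SPEC =====
-- A indexes g2[i] for every i < len(g1) and raises IndexError if g2 is shorter;
-- Pre_ admits exactly the inputs on which A returns.
def Pre_group1WinCount (g1 : List Int) (g2 : List Int) : Prop := g1.length ≤ g2.length
instance (g1 : List Int) (g2 : List Int) : Decidable (Pre_group1WinCount g1 g2) := by
  unfold Pre_group1WinCount; infer_instance

def pvWitness_group1WinCount : List Int × List Int := ([3, -1, 0], [1, -1, -2])

def Spec_group1WinCount (g1 : List Int) (g2 : List Int) (out : Int) : Prop := out = group1WinCount_alt g1 g2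
instance (g1 : List Int) (g2 : List Int) (out : Int) : Decidable (Spec_group1WinCount g1 g2 out) := by unfold Spec_group1WinCount; infer_instance

-- ===== CLAIM (what is proved, stated in full; the proofs are below) =====
def Claim_equal_group1WinCount : Prop := ∀ (g1 : List Int) (g2 : List Int), Dom_group1WinCount g1 g2 → Pre_group1WinCount g1 g2 → Spec_group1WinCount g1 g2 (group1WinCount g1 g2)

-- ===== LEMMAS AND PROOFS =====

-- monotonicity of access into a ≤-sorted list
lemma pvMono (s : List Int) (hs : s.Pairwise (· ≤ ·)) {i j : Nat} (hij : i ≤ j)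
    (hj : j < s.length) : s.getD i 0 ≤ s.getD j 0 := by
  rcases Nat.lt_or_ge i j with h | h
  · have hi : i < s.length := lt_trans h hj
    rw [List.getD_eq_getElem _ _ hi, List.getD_eq_getElem _ _ hj]
    exact List.pairwise_iff_getElem.mp hs i j hi hj h
  · have : i = j := le_antisymm hij h
    subst this; rfl

-- number of entries ≤ x
def pvK (s : List Int) (x : Int) : Nat :=
  ((Finset.range s.length).filter (fun j => s.getD j 0 ≤ x)).card

lemma pvK_le (s : List Int) (x : Int) : pvK s x ≤ s.length := by
  have := Finset.card_filter_le (Finset.range s.length) (fun j => s.getD j 0 ≤ x)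
  simpa [pvK] using this

-- A's binary search computes pvK
lemma pvBsearchA_eq (s : List Int) (hs : s.Pairwise (· ≤ ·)) (x : Int) :
    ∀ (k l r : Nat), r - l ≤ k → l ≤ r → r ≤ s.length →
      (∀ j, j < l → s.getD j 0 ≤ x) → (∀ j, r ≤ j → j < s.length → x < s.getD j 0) →
      pvBsearchA s x l r = pvK s x := by
  intro k
  induction k with
  | zero =>
    intro l r hk hlr hrn h1 h2
    have hlr' : l = r := by omega
    subst hlr'
    rw [pvBsearchA]
    simp only [lt_irrefl, if_false]
    have : (Finset.range s.length).filter (fun j => s.getD j 0 ≤ x) = Finset.range l := by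
      ext j
      simp only [Finset.mem_filter, Finset.mem_range]
      constructor
      · rintro ⟨hj, hle⟩
        by_contra hjl
        exact absurd hle (not_le.mpr (h2 j (by omega) hj))
      · intro hj
        exact ⟨by omega, h1 j hj⟩
    unfold pvK
    rw [this, Finset.card_range]
  | succ k ih =>
    intro l r hk hlr hrn h1 h2
    by_cases h : l < r
    · rw [pvBsearchA]
      simp only [h, if_true]
      have hmidl : l ≤ (l + r) / 2 := by omega
      have hmidr : (l + r) / 2 < r := by omega
      by_cases hm : s.getD ((l + r) / 2) 0 ≤ x
      · simp only [hm, if_true]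
        refine ih ((l + r) / 2 + 1) r (by omega) (by omega) hrn ?_ h2
        intro j hj
        exact le_trans (pvMono s hs (by omega) (by omega)) hm
      · simp only [hm, if_false]
        refine ih l ((l + r) / 2) (by omega) (by omega) (by omega) h1 ?_
        intro j hj hjn
        exact lt_of_lt_of_le (not_le.mp hm) (pvMono s hs hj hjn)
    · have hlr' : l = r := by omega
      subst hlr'
      exact ih l l (by omega) le_rfl hrn h1 h2

-- A's running "add then mod if positive" fold equals the mod of the total
lemma pvFoldMod (M : Int) (hM : 0 < M) (c : Nat → Nat) :
    ∀ (L : List Nat) (t : Nat),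
      L.foldl (fun a i => if a + (c i : Int) > 0 then (a + (c i : Int)) % M else a + (c i : Int))
        (((t : Nat) : Int) % M)
        = (((t + (L.map c).sum : Nat) : Int) % M) := by
  intro L
  induction L with
  | nil => intro t; simp
  | cons i L ih =>
    intro t
    simp only [List.foldl_cons]
    have hnn : (0 : Int) ≤ (t : Int) % M := Int.emod_nonneg _ (ne_of_gt hM)
    have hci : (0 : Int) ≤ (c i : Int) := Int.natCast_nonneg _
    have key : (if (t : Int) % M + (c i : Int) > 0 then ((t : Int) % M + (c i : Int)) % M
        else (t : Int) % M + (c i : Int)) = (((t + c i : Nat) : Int) % M) := by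
      have hmm : ((t : Int) % M + (c i : Int)) % M = (((t + c i : Nat) : Int) % M) := by
        push_cast
        rw [Int.emod_add_emod]
      split_ifs with h
      · exact hmm
      · have hz : (t : Int) % M + (c i : Int) = 0 := by omega
        rw [← hmm, hz]
        simp
    rw [key, ih (t + c i)]
    congr 1
    rw [List.map_cons, List.sum_cons]
    push_cast
    ring

-- pointwise-equal fold bodies give equal folds
lemma pvFoldlExt (f g : Int → Nat → Int) :
    ∀ (L : List Nat), (∀ a, ∀ i ∈ L, f a i = g a i) → ∀ a, L.foldl f a = L.foldl g a := by
  intro L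
  induction L with
  | nil => intro _ a; rfl
  | cons i L ih =>
    intro h a
    simp only [List.foldl_cons]
    rw [h a i (by simp)]
    exact ih (fun a j hj => h a j (by simp [hj])) _

-- the indicator of a "winning" pair
def pvF (s : List Int) (i j : Nat) : Nat :=
  if i < j ∧ s.getD i 0 + s.getD j 0 > 0 then 1 else 0

-- number of winning pairs inside the window [l, r]
def pvW (s : List Int) (l r : Nat) : Nat :=
  ∑ i ∈ Finset.Ico l (r + 1), ∑ j ∈ Finset.Ico l (r + 1), pvF s i j

lemma pvW_empty (s : List Int) (l r : Nat) (h : ¬ l < r) : pvW s l r = 0 := by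
  unfold pvW
  refine Finset.sum_eq_zero (fun i hi => Finset.sum_eq_zero (fun j hj => ?_))
  rw [Finset.mem_Ico] at hi hj
  unfold pvF
  rw [if_neg]
  rintro ⟨hij, -⟩
  omega

-- B's two-pointer loop counts the winning pairs in its window
lemma pvTwoPtr_eq (s : List Int) (hs : s.Pairwise (· ≤ ·)) :
    ∀ (k l r : Nat) (c : Int), r - l ≤ k → r < s.length →
      pvTwoPtr s l r c = c + (pvW s l r : Int) := by
  intro k
  induction k with
  | zero =>
    intro l r c hk hr
    rw [pvTwoPtr]
    have h : ¬ l < r := by omega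
    rw [if_neg h, pvW_empty s l r h]
    simp
  | succ k ih =>
    intro l r c hk hr
    rw [pvTwoPtr]
    by_cases h : l < r
    · rw [if_pos h]
      by_cases hp : s.getD l 0 + s.getD r 0 > 0
      · rw [if_pos hp, ih l (r - 1) _ (by omega) (by omega)]
        have hsplit : pvW s l r = pvW s l (r - 1) + (r - l) := by
          unfold pvW
          have hr1 : r - 1 + 1 = r := by omega
          rw [hr1]
          have houter : ∀ i ∈ Finset.Ico l (r + 1),
              ∑ j ∈ Finset.Ico l (r + 1), pvF s i j
                = (∑ j ∈ Finset.Ico l r, pvF s i j) + pvF s i r := by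
            intro i _
            rw [Finset.sum_Ico_succ_top (by omega)]
          rw [Finset.sum_congr rfl houter, Finset.sum_add_distrib,
            Finset.sum_Ico_succ_top (by omega : l ≤ r)]
          have hFr : ∀ j ∈ Finset.Ico l r, pvF s r j = 0 := by
            intro j hj
            rw [Finset.mem_Ico] at hj
            unfold pvF
            rw [if_neg]
            rintro ⟨hij, -⟩
            omega
          rw [Finset.sum_eq_zero hFr]
          have hlast : ∑ i ∈ Finset.Ico l (r + 1), pvF s i r
              = ∑ i ∈ Finset.Ico l r, pvF s i r + pvF s r r := by
            rw [Finset.sum_Ico_succ_top (by omega)]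
          have hFrr : pvF s r r = 0 := by unfold pvF; rw [if_neg]; rintro ⟨hij, -⟩; omega
          have hones : ∀ i ∈ Finset.Ico l r, pvF s i r = 1 := by
            intro i hi
            rw [Finset.mem_Ico] at hi
            unfold pvF
            rw [if_pos]
            refine ⟨hi.2, ?_⟩
            have := pvMono s hs hi.1 (lt_trans hi.2 hr)
            omega
          rw [hlast, hFrr, Finset.sum_congr rfl hones]
          simp [Nat.card_Ico]
        rw [hsplit]
        push_cast
        ring
      · rw [if_neg hp, ih (l + 1) r c (by omega) hr]
        have hW : pvW s l r = pvW s (l + 1) r := by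
          unfold pvW
          rw [Finset.sum_eq_sum_Ico_succ_bot (by omega : l < r + 1)]
          have hFl : ∀ j ∈ Finset.Ico l (r + 1), pvF s l j = 0 := by
            intro j hj
            rw [Finset.mem_Ico] at hj
            unfold pvF
            rw [if_neg]
            rintro ⟨hij, hsum⟩
            have hjr : s.getD j 0 ≤ s.getD r 0 := pvMono s hs (by omega) hr
            omega
          rw [Finset.sum_eq_zero hFl, zero_add]
          refine Finset.sum_congr rfl (fun i hi => ?_)
          rw [Finset.mem_Ico] at hi
          rw [Finset.sum_eq_sum_Ico_succ_bot (by omega : l < r + 1)]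
          have : pvF s i l = 0 := by
            unfold pvF
            rw [if_neg]
            rintro ⟨hij, -⟩
            omega
          rw [this, zero_add]
        rw [hW]
    · rw [if_neg h, pvW_empty s l r h]
      simp

-- A's per-index contribution
def pvCN (s : List Int) (i : Nat) : Nat :=
  if s.getD i 0 > 0 then s.length - 1 - i else s.length - pvK s (-(s.getD i 0))

-- the sum of A's contributions is the number of winning pairs
lemma pvSum_eq_pvW (s : List Int) (hs : s.Pairwise (· ≤ ·)) (hn : 0 < s.length) :
    ∑ i ∈ Finset.range s.length, pvCN s i = pvW s 0 (s.length - 1) := by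
  unfold pvW
  have h1 : s.length - 1 + 1 = s.length := by omega
  rw [h1]
  have hico : Finset.Ico 0 s.length = Finset.range s.length := by
    ext j; simp
  rw [hico]
  refine (Finset.sum_congr rfl (fun i hi => ?_)).symm
  rw [Finset.mem_range] at hi
  by_cases hp : s.getD i 0 > 0
  · -- every j > i wins
    have hpoint : ∀ j ∈ Finset.range s.length, pvF s i j = if i < j then 1 else 0 := by
      intro j hj
      rw [Finset.mem_range] at hj
      unfold pvF
      by_cases hij : i < j
      · rw [if_pos, if_pos hij]
        refine ⟨hij, ?_⟩
        have := pvMono s hs (le_of_lt hij) hj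
        omega
      · rw [if_neg, if_neg hij]; rintro ⟨h', -⟩; exact hij h'
    rw [Finset.sum_congr rfl hpoint, ← Finset.card_filter]
    have : (Finset.range s.length).filter (fun j => i < j) = Finset.Ico (i + 1) s.length := by
      ext j; simp [Finset.mem_Ico]; omega
    rw [this, Nat.card_Ico]
    unfold pvCN
    rw [if_pos hp]
    omega
  · -- winners are exactly the j with s[j] > -s[i]
    have hpoint : ∀ j ∈ Finset.range s.length,
        pvF s i j = if -(s.getD i 0) < s.getD j 0 then 1 else 0 := by
      intro j hj
      rw [Finset.mem_range] at hj
      unfold pvF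
      by_cases hc : -(s.getD i 0) < s.getD j 0
      · rw [if_pos, if_pos hc]
        constructor
        · by_contra hij
          have : s.getD j 0 ≤ s.getD i 0 := pvMono s hs (by omega) hi
          omega
        · omega
      · rw [if_neg, if_neg hc]; rintro ⟨-, h'⟩; omega
    rw [Finset.sum_congr rfl hpoint, ← Finset.card_filter]
    unfold pvCN
    rw [if_neg hp]
    have hcompl := Finset.card_filter_add_card_filter_not
      (s := Finset.range s.length) (p := fun j => s.getD j 0 ≤ -(s.getD i 0))
    have hneg : (Finset.range s.length).filter (fun j => ¬ (s.getD j 0 ≤ -(s.getD i 0)))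
        = (Finset.range s.length).filter (fun j => -(s.getD i 0) < s.getD j 0) := by
      ext j; simp [not_le]
    rw [hneg] at hcompl
    have hKdef : ((Finset.range s.length).filter (fun j => s.getD j 0 ≤ -(s.getD i 0))).card
        = pvK s (-(s.getD i 0)) := rfl
    rw [hKdef] at hcompl
    have := Finset.card_range s.length
    omega

-- list-sum over range = Finset sum
lemma pvSumRange (f : Nat → Nat) : ∀ n, ((List.range n).map f).sum = ∑ i ∈ Finset.range n, f i := by
  intro n
  induction n with
  | zero => simp
  | succ n ih => rw [List.range_succ, Finset.sum_range_succ]; simp [ih]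

-- ===== VERDICT (by name: the statement is the Claim_ definition above) =====
theorem group1WinCount_spec : Claim_equal_group1WinCount := by
  intro g1 g2 _ hpre
  unfold Spec_group1WinCount
  simp only [group1WinCount, group1WinCount_alt]
  have hpre' : g1.length ≤ g2.length := hpre
  -- both programs build the same difference list
  have hd : (List.range g1.length).map (fun i => g1.getD i 0 - g2.getD i 0)
      = (g1.zip g2).map (fun p => p.1 - p.2) := by
    apply List.ext_getElem
    · simp [List.length_zip]; omega
    · intro i h1 h2
      have hi : i < g1.length := by simpa using h1
      have hi2 : i < g2.length := lt_of_lt_of_le hi hpre'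
      simp only [List.getElem_map, List.getElem_range, List.getElem_zip]
      rw [List.getD_eq_getElem _ _ hi, List.getD_eq_getElem _ _ hi2]
  rw [← hd]
  set s := PySem.List.sorted ((List.range g1.length).map (fun i => g1.getD i 0 - g2.getD i 0))
    (fun x => x) false with hsdef
  have hs : s.Pairwise (· ≤ ·) := by
    have := PySem.List.sorted_pairwise
      ((List.range g1.length).map (fun i => g1.getD i 0 - g2.getD i 0)) (fun x => x)
    simpa [hsdef] using this
  have hlen : s.length = g1.length := by
    simp [hsdef, PySem.List.length_sorted]
  set n := g1.length with hn
  set M : Int := 1000000007 with hM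
  have hMpos : (0 : Int) < M := by rw [hM]; norm_num
  -- A's fold body, normalised to "add pvCN then mod"
  have hbody : (List.range n).foldl (fun ans i =>
        if s.getD i 0 > 0 then
          if ans + ((n : Int) - (i : Int) - 1) > 0 then (ans + ((n : Int) - (i : Int) - 1)) % M
          else ans + ((n : Int) - (i : Int) - 1)
        else
          if ans + ((n : Int) - (pvBsearchA s (-(s.getD i 0)) 0 s.length : Int)) > 0 then
            (ans + ((n : Int) - (pvBsearchA s (-(s.getD i 0)) 0 s.length : Int))) % M
          else ans + ((n : Int) - (pvBsearchA s (-(s.getD i 0)) 0 s.length : Int))) 0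
      = (List.range n).foldl (fun a i =>
          if a + (pvCN s i : Int) > 0 then (a + (pvCN s i : Int)) % M else a + (pvCN s i : Int)) 0 := by
    apply pvFoldlExt
    intro a i hi
    rw [List.mem_range] at hi
    unfold pvCN
    by_cases hp : s.getD i 0 > 0
    · rw [if_pos hp, if_pos hp]
      have : (n : Int) - (i : Int) - 1 = ((s.length - 1 - i : Nat) : Int) := by
        rw [hlen]; omega
      rw [this]
    · rw [if_neg hp, if_neg hp]
      rw [pvBsearchA_eq s hs (-(s.getD i 0)) s.length 0 s.length (by omega) (by omega) le_rfl
        (by omega) (by intro j hj hj'; omega)]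
      have hK := pvK_le s (-(s.getD i 0))
      have : (n : Int) - (pvK s (-(s.getD i 0)) : Int)
          = ((s.length - pvK s (-(s.getD i 0)) : Nat) : Int) := by
        rw [hlen]; omega
      rw [this]
  rw [hbody]
  have hfold := pvFoldMod M hMpos (pvCN s) (List.range n) 0
  simp only [Nat.cast_zero, Int.zero_emod, zero_add] at hfold
  rw [hfold, pvSumRange (pvCN s) n]
  by_cases hn0 : n = 0
  · have hs0 : s = [] := by
      have h0 : s.length = 0 := by omega
      exact List.eq_nil_of_length_eq_zero h0
    rw [hn0, hs0, pvTwoPtr]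
    simp
  · have hnpos : 0 < s.length := by omega
    rw [pvTwoPtr_eq s hs (s.length - 1) 0 (s.length - 1) 0 (by omega) (by omega)]
    rw [← hlen, pvSum_eq_pvW s hs hnpos]
    simp
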